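-- pv_equiv track=rewrite | github.com/Jerresand/Thesis-RST | pd_pipeline/data.py | sic_to_div2_sector
-- ===== SOURCE A (Python) =====
-- SIC_DIV2_RANGES = [
--     (1000, 1999, 'Mining & Construction'),
--     (2000, 2999, 'Light Manufacturing'),
--     (3000, 3999, 'Heavy Manufacturing'),
--     (4000, 4799, 'Transportation'),
--     (4800, 4899, 'Communications'),
--     (4900, 4999, 'Utilities'),
--     (5000, 5999, 'Wholesale & Retail Trade'),
--     (6000, 6999, 'Finance, Insurance & Real Estate'),
--     (7000, 7999, 'Services'),
--     (8000, 8999, 'Health, Legal & Educational Services'),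
--     (9000, 9999, 'Public Administration'),
-- ]
--
-- def sic_to_div2_sector(sic) -> str:
--     """Map a 4-digit SIC code to a div2 sector name."""
--     try:
--         sic_int = int(str(sic).strip())
--     except (ValueError, TypeError):
--         return 'Unassigned'
--     for lo, hi, name in SIC_DIV2_RANGES:
--         if lo <= sic_int <= hi:
--             return name
--     return 'Unassigned'
-- ===== SOURCE B (Python) =====
-- DIV2_BY_THOUSANDS = {
--     1: 'Mining & Construction',
--     2: 'Light Manufacturing',
--     3: 'Heavy Manufacturing',
--     5: 'Wholesale & Retail Trade',
--     6: 'Finance, Insurance & Real Estate',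
--     7: 'Services',
--     8: 'Health, Legal & Educational Services',
--     9: 'Public Administration',
-- }
--
-- def sic_to_div2_sector(sic) -> str:
--     """Map a 4-digit SIC code to a div2 sector name."""
--     try:
--         sic_int = int(str(sic).strip())
--     except (ValueError, TypeError):
--         return 'Unassigned'
--     t = sic_int // 1000
--     if t == 4:
--         if sic_int <= 4799:
--             return 'Transportation'
--         if sic_int <= 4899:
--             return 'Communications'
--         return 'Utilities'
--     return DIV2_BY_THOUSANDS.get(t, 'Unassigned')
-- ===== Notes on version B (the rewrite author's own statement) =====
-- stated objective: alternative
-- what changed: Replaces the linear scan over the (lo, hi, name) range table with constant-time arithmetic dispatch: the code's leading digit (floor division) keys a dict of sectors, with an explicit sub-split of the fours band into Transportation/Communications/Utilities.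
import Mathlib
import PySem

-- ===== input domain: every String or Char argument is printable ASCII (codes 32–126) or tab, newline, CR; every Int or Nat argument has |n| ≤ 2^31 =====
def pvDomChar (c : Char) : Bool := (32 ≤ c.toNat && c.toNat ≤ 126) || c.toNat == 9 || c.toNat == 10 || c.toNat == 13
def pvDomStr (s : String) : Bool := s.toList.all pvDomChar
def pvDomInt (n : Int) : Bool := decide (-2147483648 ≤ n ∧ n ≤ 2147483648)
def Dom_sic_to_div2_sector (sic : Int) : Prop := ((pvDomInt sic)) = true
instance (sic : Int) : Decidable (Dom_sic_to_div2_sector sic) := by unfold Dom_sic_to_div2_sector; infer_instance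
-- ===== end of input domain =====

-- B replaces A's linear scan of the range table by floor-division dispatch on the leading digit (alternative decomposition, same results).
-- Note: the Lean argument is already an Int, so A's int(str(sic).strip()) parse always succeeds and is the identity.

-- ===== PORT A =====
def SIC_DIV2_RANGES : List (Int × Int × String) :=
  [ (1000, 1999, "Mining & Construction"),
    (2000, 2999, "Light Manufacturing"),
    (3000, 3999, "Heavy Manufacturing"),
    (4000, 4799, "Transportation"),
    (4800, 4899, "Communications"),
    (4900, 4999, "Utilities"),
    (5000, 5999, "Wholesale & Retail Trade"),
    (6000, 6999, "Finance, Insurance & Real Estate"),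
    (7000, 7999, "Services"),
    (8000, 8999, "Health, Legal & Educational Services"),
    (9000, 9999, "Public Administration") ]

-- the for-loop with early return, as structural recursion over the range list
def pvScanRanges (ranges : List (Int × Int × String)) (sicInt : Int) : String :=
  match ranges with
  | [] => "Unassigned"
  | (lo, hi, name) :: rest =>
      if lo ≤ sicInt ∧ sicInt ≤ hi then name else pvScanRanges rest sicInt

def sic_to_div2_sector (sic : Int) : String :=
  pvScanRanges SIC_DIV2_RANGES sic

-- ===== PORT B =====
def DIV2_BY_THOUSANDS : PySem.Dict Int String :=
  PySem.Dict.ofList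
    [ (1, "Mining & Construction"),
      (2, "Light Manufacturing"),
      (3, "Heavy Manufacturing"),
      (5, "Wholesale & Retail Trade"),
      (6, "Finance, Insurance & Real Estate"),
      (7, "Services"),
      (8, "Health, Legal & Educational Services"),
      (9, "Public Administration") ]

def sic_to_div2_sector_alt (sic : Int) : String :=
  let t := PySem.Int.floordiv sic 1000
  if t = 4 then
    if sic ≤ 4799 then "Transportation"
    else if sic ≤ 4899 then "Communications"
    else "Utilities"
  else DIV2_BY_THOUSANDS.getD t "Unassigned"

-- ===== PRECONDITION & SPEC =====
def Spec_sic_to_div2_sector (sic : Int) (out : String) : Prop := out = sic_to_div2_sector_alt sic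
instance (sic : Int) (out : String) : Decidable (Spec_sic_to_div2_sector sic out) := by unfold Spec_sic_to_div2_sector; infer_instance

-- ===== CLAIM (what is proved, stated in full; the proofs are below) =====
def Claim_equal_sic_to_div2_sector : Prop := ∀ (sic : Int), Dom_sic_to_div2_sector sic → Spec_sic_to_div2_sector sic (sic_to_div2_sector sic)

-- ===== LEMMAS AND PROOFS =====

-- ===== VERDICT (by name: the statement is the Claim_ definition above) =====
-- B's dispatch as a function of the thousands digit
lemma pv_alt_of_fdiv (sic k : Int) (hk : sic / 1000 = k) (hk4 : k ≠ 4) :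
    sic_to_div2_sector_alt sic = DIV2_BY_THOUSANDS.getD k "Unassigned" := by
  rw [sic_to_div2_sector_alt,
    show PySem.Int.floordiv sic 1000 = sic / 1000 from
      PySem.Int.floordiv_eq_ediv_of_pos (by norm_num), hk, if_neg hk4]

lemma pv_alt_of_4 (sic : Int) (h : 4000 ≤ sic ∧ sic ≤ 4999) :
    sic_to_div2_sector_alt sic =
      (if sic ≤ 4799 then "Transportation"
       else if sic ≤ 4899 then "Communications" else "Utilities") := by
  rw [sic_to_div2_sector_alt,
    show PySem.Int.floordiv sic 1000 = sic / 1000 from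
      PySem.Int.floordiv_eq_ediv_of_pos (by norm_num),
    if_pos (by omega : sic / 1000 = 4)]

theorem sic_to_div2_sector_spec : Claim_equal_sic_to_div2_sector := by
  intro sic _
  show pvScanRanges SIC_DIV2_RANGES sic = sic_to_div2_sector_alt sic
  simp only [SIC_DIV2_RANGES, pvScanRanges]
  by_cases h1 : 1000 ≤ sic ∧ sic ≤ 1999
  · rw [if_pos h1, pv_alt_of_fdiv sic 1 (by omega) (by omega)]; decide
  rw [if_neg h1]
  by_cases h2 : 2000 ≤ sic ∧ sic ≤ 2999
  · rw [if_pos h2, pv_alt_of_fdiv sic 2 (by omega) (by omega)]; decide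
  rw [if_neg h2]
  by_cases h3 : 3000 ≤ sic ∧ sic ≤ 3999
  · rw [if_pos h3, pv_alt_of_fdiv sic 3 (by omega) (by omega)]; decide
  rw [if_neg h3]
  by_cases h4 : 4000 ≤ sic ∧ sic ≤ 4799
  · rw [if_pos h4, pv_alt_of_4 sic (by omega), if_pos (by omega : sic ≤ 4799)]
  rw [if_neg h4]
  by_cases h5 : 4800 ≤ sic ∧ sic ≤ 4899
  · rw [if_pos h5, pv_alt_of_4 sic (by omega), if_neg (by omega : ¬ sic ≤ 4799),
        if_pos (by omega : sic ≤ 4899)]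
  rw [if_neg h5]
  by_cases h6 : 4900 ≤ sic ∧ sic ≤ 4999
  · rw [if_pos h6, pv_alt_of_4 sic (by omega), if_neg (by omega : ¬ sic ≤ 4799),
        if_neg (by omega : ¬ sic ≤ 4899)]
  rw [if_neg h6]
  by_cases h7 : 5000 ≤ sic ∧ sic ≤ 5999
  · rw [if_pos h7, pv_alt_of_fdiv sic 5 (by omega) (by omega)]; decide
  rw [if_neg h7]
  by_cases h8 : 6000 ≤ sic ∧ sic ≤ 6999
  · rw [if_pos h8, pv_alt_of_fdiv sic 6 (by omega) (by omega)]; decide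
  rw [if_neg h8]
  by_cases h9 : 7000 ≤ sic ∧ sic ≤ 7999
  · rw [if_pos h9, pv_alt_of_fdiv sic 7 (by omega) (by omega)]; decide
  rw [if_neg h9]
  by_cases h10 : 8000 ≤ sic ∧ sic ≤ 8999
  · rw [if_pos h10, pv_alt_of_fdiv sic 8 (by omega) (by omega)]; decide
  rw [if_neg h10]
  by_cases h11 : 9000 ≤ sic ∧ sic ≤ 9999
  · rw [if_pos h11, pv_alt_of_fdiv sic 9 (by omega) (by omega)]; decide
  rw [if_neg h11]
  -- no range matched: sic / 1000 lies outside {1,…,9}, so B's lookup misses too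
  rw [pv_alt_of_fdiv sic (sic / 1000) rfl (by omega)]
  rw [show DIV2_BY_THOUSANDS = PySem.Dict.mk
      [ (1, "Mining & Construction"),
        (2, "Light Manufacturing"),
        (3, "Heavy Manufacturing"),
        (5, "Wholesale & Retail Trade"),
        (6, "Finance, Insurance & Real Estate"),
        (7, "Services"),
        (8, "Health, Legal & Educational Services"),
        (9, "Public Administration") ] from by decide]
  simp only [PySem.Dict.getD, PySem.Dict.get?_mk_cons, beq_iff_eq]
  rw [if_neg (by omega : ¬ (1:Int) = sic / 1000), if_neg (by omega : ¬ (2:Int) = sic / 1000),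
      if_neg (by omega : ¬ (3:Int) = sic / 1000), if_neg (by omega : ¬ (5:Int) = sic / 1000),
      if_neg (by omega : ¬ (6:Int) = sic / 1000), if_neg (by omega : ¬ (7:Int) = sic / 1000),
      if_neg (by omega : ¬ (8:Int) = sic / 1000), if_neg (by omega : ¬ (9:Int) = sic / 1000)]
  rfl
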